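-- pv_equiv track=rewrite | github.com/pypi-data/pypi-mirror-390 | packages/osiris-pipeline/osiris_pipeline-0.5.1-py3-none-any.whl/osiris/core/compiler_v0.py | _pointer_to_segments
-- ===== SOURCE A (Python) =====
-- def _pointer_to_segments(pointer: str) -> list[str]:
--     if not pointer:
--         return []
--     trimmed = pointer[1:] if pointer.startswith("/") else pointer
--     if not trimmed:
--         return []
--     parts: list[str] = []
--     for segment in trimmed.split("/"):
--         segment = segment.replace("~1", "/").replace("~0", "~")
--         if segment:
--             parts.append(segment)
--     return parts
-- ===== SOURCE B (Python) =====
-- def _pointer_to_segments(pointer: str) -> list[str]: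
--     if not pointer:
--         return []
--     s = pointer[1:] if pointer[0] == "/" else pointer
--     out: list[str] = []
--     buf: list[str] = []
--     i = 0
--     n = len(s)
--     while i < n:
--         ch = s[i]
--         if ch == "/":
--             if buf:
--                 out.append("".join(buf))
--             buf = []
--         elif ch == "~":
--             nxt = s[i + 1] if i + 1 < n else ""
--             if nxt == "1":
--                 buf.append("/")
--                 i += 1
--             elif nxt == "0":
--                 buf.append("~")
--                 i += 1
--             else:
--                 buf.append("~")
--         else:
--             buf.append(ch)
--         i += 1
--     if buf:
--         out.append("".join(buf))
--     return out
-- ===== Notes on version B (the rewrite author's own statement) =====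
-- stated objective: alternative
-- what changed: Replaced the split-on-separator plus two chained str.replace passes per segment with a single-pass character scanner that splits and unescapes the two JSON-pointer escape sequences in one traversal, maintaining a current-segment buffer.
import Mathlib
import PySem

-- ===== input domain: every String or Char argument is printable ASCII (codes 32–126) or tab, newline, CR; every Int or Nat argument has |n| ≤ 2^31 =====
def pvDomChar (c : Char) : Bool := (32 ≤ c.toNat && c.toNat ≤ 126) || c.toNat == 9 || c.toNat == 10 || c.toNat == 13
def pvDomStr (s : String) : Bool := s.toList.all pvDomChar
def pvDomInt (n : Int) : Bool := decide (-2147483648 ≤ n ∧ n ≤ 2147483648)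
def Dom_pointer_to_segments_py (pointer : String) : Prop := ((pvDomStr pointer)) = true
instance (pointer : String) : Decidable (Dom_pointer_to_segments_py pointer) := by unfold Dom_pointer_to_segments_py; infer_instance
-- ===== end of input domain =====

-- B replaces split('/') + two chained str.replace passes per segment with a single-pass scanner; same cost class, different decomposition.

-- ===== PORT A =====
def pointer_to_segments_py (pointer : String) : List String :=
  if PySem.Str.len pointer = 0 then []
  else
    let trimmed := if PySem.Str.startswith pointer "/" then PySem.Str.slice pointer (some 1) none else pointer
    if PySem.Str.len trimmed = 0 then []
    else
      -- trimmed.split("/"): the separator is the literal "/", nonempty, so split? is `some`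
      ((PySem.Str.split? trimmed "/").getD []).foldl
        (fun parts segment =>
          let seg := PySem.Str.replace (PySem.Str.replace segment "~1" "/") "~0" "~"
          if PySem.Str.len seg ≠ 0 then parts ++ [seg] else parts) []

-- ===== PORT B =====
-- scanner loop of Source B: current-segment buffer `buf`, output `out`; '/' closes a segment,
-- '~' peeks one character ahead ('1' → '/', '0' → '~', else a literal '~')
def pvScan : List Char → List Char → List String → List String
  | [], buf, out => if buf = [] then out else out ++ [String.ofList buf]
  | c :: rest, buf, out =>
    if c = '/' then pvScan rest [] (if buf = [] then out else out ++ [String.ofList buf])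
    else if c = '~' then
      match rest with
      | d :: rest' =>
        if d = '1' then pvScan rest' (buf ++ ['/']) out
        else if d = '0' then pvScan rest' (buf ++ ['~']) out
        else pvScan (d :: rest') (buf ++ ['~']) out
      | [] => pvScan [] (buf ++ ['~']) out
    else pvScan rest (buf ++ [c]) out
termination_by s _ _ => s.length
decreasing_by all_goals simp_all; try omega

def pointer_to_segments_py_alt (pointer : String) : List String :=
  match pointer.toList with
  | [] => []
  | c :: rest => pvScan (if c = '/' then rest else c :: rest) [] []

-- ===== PRECONDITION & SPEC =====
def Spec_pointer_to_segments_py (pointer : String) (out : List String) : Prop := out = pointer_to_segments_py_alt pointer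
instance (pointer : String) (out : List String) : Decidable (Spec_pointer_to_segments_py pointer out) := by unfold Spec_pointer_to_segments_py; infer_instance

-- ===== CLAIM (what is proved, stated in full; the proofs are below) =====
def Claim_equal_pointer_to_segments_py : Prop := ∀ (pointer : String), Dom_pointer_to_segments_py pointer → Spec_pointer_to_segments_py pointer (pointer_to_segments_py pointer)

-- ===== LEMMAS AND PROOFS =====

-- "~1"→"/" replacement as a left-to-right two-character recursion (first replace pass)
def pvR1 : List Char → List Char
  | [] => []
  | [c] => [c]
  | c :: d :: t => if c = '~' ∧ d = '1' then '/' :: pvR1 t else c :: pvR1 (d :: t)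

-- "~0"→"~" replacement (second replace pass)
def pvR0 : List Char → List Char
  | [] => []
  | [c] => [c]
  | c :: d :: t => if c = '~' ∧ d = '0' then '~' :: pvR0 t else c :: pvR0 (d :: t)

-- one-pass unescape (what the scanner does inside a single segment)
def pvU : List Char → List Char
  | [] => []
  | c :: r =>
    if c = '~' then
      match r with
      | d :: r' => if d = '1' then '/' :: pvU r' else if d = '0' then '~' :: pvU r' else '~' :: pvU (d :: r')
      | [] => ['~']
    else c :: pvU r
termination_by l => l.length
decreasing_by all_goals simp_all; try omega

-- raw segments obtained by splitting on '/'
def pvSplit : List Char → List (List Char)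
  | [] => [[]]
  | c :: r => if c = '/' then [] :: pvSplit r
              else match pvSplit r with
                   | [] => [[c]]
                   | h :: t => (c :: h) :: t

-- A's accumulation loop on the Chars level
def pvPush (out : List String) (L : List (List Char)) : List String :=
  L.foldl (fun parts seg => if seg.length ≠ 0 then parts ++ [String.ofList seg] else parts) out

lemma pvSplit_ne_nil (s : List Char) : pvSplit s ≠ [] := by
  cases s with
  | nil => simp [pvSplit]
  | cons c r =>
    simp only [pvSplit]
    split
    · simp
    · cases h : pvSplit r <;> simp

lemma replace_go_R1 : ∀ (fuel : Nat) (l acc : List Char), l.length ≤ fuel →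
    PySem.Chars.replace.go ['~', '1'] ['/'] fuel l acc = acc.reverse ++ pvR1 l := by
  intro fuel
  induction fuel with
  | zero =>
    intro l acc h
    have hl : l = [] := by
      cases l with
      | nil => rfl
      | cons c t => simp at h
    subst hl
    simp [PySem.Chars.replace.go, pvR1]
  | succ n ih =>
    intro l acc h
    match l with
    | [] => simp [PySem.Chars.replace.go, pvR1]
    | [c] =>
      have hp : List.isPrefixOf ['~', '1'] [c] = false := by simp [List.isPrefixOf]
      simp only [PySem.Chars.replace.go]
      rw [hp]
      simp only [if_neg Bool.false_ne_true]
      rw [ih [] _ (by simp)]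
      simp [pvR1]
    | c :: d :: t =>
      simp only [PySem.Chars.replace.go]
      by_cases hcd : c = '~' ∧ d = '1'
      · obtain ⟨hc, hd⟩ := hcd
        subst hc; subst hd
        have hp : List.isPrefixOf ['~', '1'] ('~' :: '1' :: t) = true := by
          simp [List.isPrefixOf]
        rw [if_pos hp]
        have hdrop : List.drop ['~', '1'].length ('~' :: '1' :: t) = t := rfl
        rw [hdrop, ih t _ (by simp at h ⊢; omega)]
        simp [pvR1]
      · have hp : List.isPrefixOf ['~', '1'] (c :: d :: t) = false := by
          simp [List.isPrefixOf]
          intro h1 h2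
          exact hcd ⟨h1.symm, h2.symm⟩
        rw [hp]
        simp only [if_neg Bool.false_ne_true]
        rw [ih (d :: t) _ (by simp at h ⊢; omega)]
        simp [pvR1, hcd]

lemma replace_go_R0 : ∀ (fuel : Nat) (l acc : List Char), l.length ≤ fuel →
    PySem.Chars.replace.go ['~', '0'] ['~'] fuel l acc = acc.reverse ++ pvR0 l := by
  intro fuel
  induction fuel with
  | zero =>
    intro l acc h
    have hl : l = [] := by
      cases l with
      | nil => rfl
      | cons c t => simp at h
    subst hl
    simp [PySem.Chars.replace.go, pvR0]
  | succ n ih =>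
    intro l acc h
    match l with
    | [] => simp [PySem.Chars.replace.go, pvR0]
    | [c] =>
      have hp : List.isPrefixOf ['~', '0'] [c] = false := by simp [List.isPrefixOf]
      simp only [PySem.Chars.replace.go]
      rw [hp]
      simp only [if_neg Bool.false_ne_true]
      rw [ih [] _ (by simp)]
      simp [pvR0]
    | c :: d :: t =>
      simp only [PySem.Chars.replace.go]
      by_cases hcd : c = '~' ∧ d = '0'
      · obtain ⟨hc, hd⟩ := hcd
        subst hc; subst hd
        have hp : List.isPrefixOf ['~', '0'] ('~' :: '0' :: t) = true := by
          simp [List.isPrefixOf]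
        rw [if_pos hp]
        have hdrop : List.drop ['~', '0'].length ('~' :: '0' :: t) = t := rfl
        rw [hdrop, ih t _ (by simp at h ⊢; omega)]
        simp [pvR0]
      · have hp : List.isPrefixOf ['~', '0'] (c :: d :: t) = false := by
          simp [List.isPrefixOf]
          intro h1 h2
          exact hcd ⟨h1.symm, h2.symm⟩
        rw [hp]
        simp only [if_neg Bool.false_ne_true]
        rw [ih (d :: t) _ (by simp at h ⊢; omega)]
        simp [pvR0, hcd]

lemma replace_R1 (s : List Char) : PySem.Chars.replace s ['~', '1'] ['/'] = pvR1 s := by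
  simp [PySem.Chars.replace, replace_go_R1 s.length s [] (le_refl _)]

lemma replace_R0 (s : List Char) : PySem.Chars.replace s ['~', '0'] ['~'] = pvR0 s := by
  simp [PySem.Chars.replace, replace_go_R0 s.length s [] (le_refl _)]

-- the head of pvR1's output is '0' only if the input's head was
lemma pvR1_head (x : List Char) (hx : ∀ c, x.head? = some c → c ≠ '0') :
    ∀ c, (pvR1 x).head? = some c → c ≠ '0' := by
  match x with
  | [] => simp [pvR1]
  | [c] => simpa [pvR1] using hx
  | c :: d :: t =>
    intro e he
    by_cases hcd : c = '~' ∧ d = '1'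
    · simp [pvR1, hcd] at he; subst he; decide
    · simp [pvR1, hcd] at he
      exact hx e (by simp [he])

-- the two chained replace passes equal the one-pass unescape
lemma R0_R1 (s : List Char) : pvR0 (pvR1 s) = pvU s := by
  match s with
  | [] => simp [pvR0, pvR1, pvU]
  | [c] =>
    by_cases hc : c = '~' <;> simp [pvR0, pvR1, pvU, hc]
  | c :: d :: t =>
    by_cases hcd : c = '~' ∧ d = '1'
    · obtain ⟨hc, hd⟩ := hcd; subst hc; subst hd
      have h1 : pvR1 ('~' :: '1' :: t) = '/' :: pvR1 t := by simp [pvR1]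
      rw [h1]
      have h0 : pvR0 ('/' :: pvR1 t) = '/' :: pvR0 (pvR1 t) := by
        cases h : pvR1 t <;> simp [pvR0]
      rw [h0, R0_R1 t]
      simp [pvU]
    · have h1 : pvR1 (c :: d :: t) = c :: pvR1 (d :: t) := by simp [pvR1, hcd]
      rw [h1]
      by_cases hc : c = '~'
      · subst hc
        have hd1 : d ≠ '1' := fun h => hcd ⟨rfl, h⟩
        by_cases hd : d = '0'
        · subst hd
          have h1' : pvR1 ('0' :: t) = '0' :: pvR1 t := by
            cases t with
            | nil => simp [pvR1]
            | cons e t' => simp [pvR1]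
          rw [h1']
          have h0 : pvR0 ('~' :: '0' :: pvR1 t) = '~' :: pvR0 (pvR1 t) := by simp [pvR0]
          rw [h0, R0_R1 t]
          simp [pvU]
        · have hhd : ∀ e, (pvR1 (d :: t)).head? = some e → e ≠ '0' :=
            pvR1_head (d :: t) (by intro e he; simp at he; subst he; exact hd)
          have h0 : pvR0 ('~' :: pvR1 (d :: t)) = '~' :: pvR0 (pvR1 (d :: t)) := by
            cases h : pvR1 (d :: t) with
            | nil => simp [pvR0]
            | cons e u =>
              have he : e ≠ '0' := hhd e (by simp [h])
              simp [pvR0, he]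
          rw [h0, R0_R1 (d :: t)]
          simp [pvU, hd, hd1]
      · have h0 : pvR0 (c :: pvR1 (d :: t)) = c :: pvR0 (pvR1 (d :: t)) := by
          cases h : pvR1 (d :: t) <;> simp [pvR0, hc]
        rw [h0, R0_R1 (d :: t)]
        simp [pvU, hc]

lemma splitOn_go_split : ∀ (fuel : Nat) (l cur : List Char) (accL : List (List Char)),
    l.length < fuel →
    PySem.Chars.splitOn.go ['/'] fuel l cur accL =
      accL.reverse ++ (cur.reverse ++ (pvSplit l).headD []) :: (pvSplit l).tail := by
  intro fuel
  induction fuel with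
  | zero => intro l cur accL h; omega
  | succ n ih =>
    intro l cur accL h
    match l with
    | [] => simp [PySem.Chars.splitOn.go, pvSplit]
    | c :: rest =>
      simp only [PySem.Chars.splitOn.go]
      by_cases hc : c = '/'
      · subst hc
        have hp : List.isPrefixOf ['/'] ('/' :: rest) = true := by
          simp [List.isPrefixOf]
        rw [if_pos hp]
        have hdrop : List.drop ['/'].length ('/' :: rest) = rest := rfl
        rw [hdrop, ih rest [] _ (by simp at h ⊢; omega)]
        rcases hsp : pvSplit rest with _ | ⟨hh, tt⟩
        · exact absurd hsp (pvSplit_ne_nil rest)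
        · simp [pvSplit, hsp]
      · have hp : List.isPrefixOf ['/'] (c :: rest) = false := by
          simp [List.isPrefixOf]
          exact fun h => hc h.symm
        rw [hp]
        simp only [if_neg Bool.false_ne_true]
        rw [ih rest (c :: cur) _ (by simp at h ⊢; omega)]
        rcases hsp : pvSplit rest with _ | ⟨hh, tt⟩
        · exact absurd hsp (pvSplit_ne_nil rest)
        · simp [pvSplit, hsp, hc]

lemma splitOn_split (s : List Char) : PySem.Chars.splitOn s ['/'] = pvSplit s := by
  rw [PySem.Chars.splitOn, splitOn_go_split (s.length + 1) s [] [] (by omega)]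
  rcases hsp : pvSplit s with _ | ⟨hh, tt⟩
  · exact absurd hsp (pvSplit_ne_nil s)
  · simp

lemma pvPush_cons (out : List String) (seg : List Char) (L : List (List Char)) :
    pvPush out (seg :: L) = pvPush (if seg = [] then out else out ++ [String.ofList seg]) L := by
  simp only [pvPush, List.foldl_cons]
  congr 1
  by_cases h : seg = [] <;> simp [h]

-- pvU unfolding helpers (pvU's equations are per two-character pattern)
lemma pvU_cons (c : Char) (x : List Char) (hc : c ≠ '~') : pvU (c :: x) = c :: pvU x := by
  cases x <;> simp [pvU, hc]

lemma pvU_t1 (x : List Char) : pvU ('~' :: '1' :: x) = '/' :: pvU x := by simp [pvU]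

lemma pvU_t0 (x : List Char) : pvU ('~' :: '0' :: x) = '~' :: pvU x := by simp [pvU]

-- pvU of '~' :: x when x does not start with '0' or '1'
lemma pvU_tilde (x : List Char) (hx : ∀ e, x.head? = some e → e ≠ '0' ∧ e ≠ '1') :
    pvU ('~' :: x) = '~' :: pvU x := by
  cases x with
  | nil => simp [pvU]
  | cons e x' =>
    have he := hx e (by simp)
    simp [pvU, he.1, he.2]

-- pvSplit unfolding helpers
lemma pvSplit_slash (r : List Char) : pvSplit ('/' :: r) = [] :: pvSplit r := by
  simp [pvSplit]

lemma pvSplit_cons_head_tail (c : Char) (r : List Char) (hc : c ≠ '/') :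
    pvSplit (c :: r) = (c :: (pvSplit r).headD []) :: (pvSplit r).tail := by
  rcases hsp : pvSplit r with _ | ⟨hh, tt⟩
  · exact absurd hsp (pvSplit_ne_nil r)
  · simp [pvSplit, hc, hsp]

-- the scanner implements A's split/unescape/filter pipeline
lemma scan_spec : ∀ (s buf : List Char) (out : List String),
    pvScan s buf out =
      pvPush out ((buf ++ pvU ((pvSplit s).headD [])) :: ((pvSplit s).tail).map pvU) := by
  intro s
  match s with
  | [] =>
    intro buf out
    simp only [pvScan, pvSplit, List.headD, List.tail, List.map_nil, pvU, List.append_nil]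
    rw [pvPush_cons]
    by_cases h : buf = [] <;> simp [h, pvPush]
  | c :: r =>
    intro buf out
    by_cases hc : c = '/'
    · subst hc
      have h1 : pvScan ('/' :: r) buf out
          = pvScan r [] (if buf = [] then out else out ++ [String.ofList buf]) := by
        cases r <;> simp [pvScan]
      rw [h1, scan_spec r, pvSplit_slash]
      rcases hsp : pvSplit r with _ | ⟨hh, tt⟩
      · exact absurd hsp (pvSplit_ne_nil r)
      · have hU : pvU ([] : List Char) = [] := by simp [pvU]
        simp only [List.headD_cons, List.tail_cons, List.map_cons, hU, List.append_nil,
          List.nil_append]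
        conv_rhs => rw [pvPush_cons]
    · by_cases hct : c = '~'
      · subst hct
        cases r with
        | nil =>
          have h1 : pvScan ['~'] buf out = pvScan [] (buf ++ ['~']) out := by
            simp [pvScan]
          rw [h1, scan_spec []]
          rw [pvSplit_cons_head_tail '~' [] (by decide)]
          simp only [pvSplit, List.headD_cons, List.tail_cons]
          have h4 : pvU ['~'] = ['~'] := by simp [pvU]
          have hU : pvU ([] : List Char) = [] := by simp [pvU]
          simp [h4, hU]
        | cons d r' =>
          by_cases hd1 : d = '1'
          · subst hd1
            have h1 : pvScan ('~' :: '1' :: r') buf out = pvScan r' (buf ++ ['/']) out := by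
              simp [pvScan]
            rw [h1, scan_spec r']
            rw [pvSplit_cons_head_tail '~' _ (by decide),
              pvSplit_cons_head_tail '1' _ (by decide)]
            simp only [List.headD_cons, List.tail_cons]
            rw [pvU_t1]
            simp
          · by_cases hd0 : d = '0'
            · subst hd0
              have h1 : pvScan ('~' :: '0' :: r') buf out = pvScan r' (buf ++ ['~']) out := by
                simp [pvScan]
              rw [h1, scan_spec r']
              rw [pvSplit_cons_head_tail '~' _ (by decide),
                pvSplit_cons_head_tail '0' _ (by decide)]
              simp only [List.headD_cons, List.tail_cons]
              rw [pvU_t0]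
              simp
            · have h1 : pvScan ('~' :: d :: r') buf out
                  = pvScan (d :: r') (buf ++ ['~']) out := by
                simp [pvScan, hd1, hd0]
              rw [h1, scan_spec (d :: r')]
              rw [pvSplit_cons_head_tail '~' _ (by decide)]
              simp only [List.headD_cons, List.tail_cons]
              have hx : ∀ e, ((pvSplit (d :: r')).headD []).head? = some e →
                  e ≠ '0' ∧ e ≠ '1' := by
                intro e he
                by_cases hds : d = '/'
                · subst hds
                  rw [pvSplit_slash] at he
                  simp at he
                · rw [pvSplit_cons_head_tail d _ hds] at he
                  simp at he
                  subst he
                  exact ⟨hd0, hd1⟩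
              rw [pvU_tilde _ hx]
              simp
      · have h1 : pvScan (c :: r) buf out = pvScan r (buf ++ [c]) out := by
          cases r <;> simp [pvScan, hc, hct]
        rw [h1, scan_spec r]
        rw [pvSplit_cons_head_tail c _ hc]
        simp only [List.headD_cons, List.tail_cons]
        rw [pvU_cons c _ hct]
        simp
termination_by s => s.length
decreasing_by all_goals simp; try omega

-- A's String-level fold over the split equals the Chars-level pvPush of the unescaped segments
lemma fold_eq_push (ps : List String) (init : List String) :
    ps.foldl (fun parts segment =>
        let seg := PySem.Str.replace (PySem.Str.replace segment "~1" "/") "~0" "~"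
        if PySem.Str.len seg ≠ 0 then parts ++ [seg] else parts) init
      = pvPush init ((ps.map String.toList).map pvU) := by
  induction ps generalizing init with
  | nil => simp [pvPush]
  | cons p ps ih =>
    have hseg : (PySem.Str.replace (PySem.Str.replace p "~1" "/") "~0" "~").toList
        = pvU p.toList := by
      rw [PySem.Str.toList_replace, PySem.Str.toList_replace]
      have e1 : ("~1" : String).toList = ['~', '1'] := by decide
      have e0 : ("~0" : String).toList = ['~', '0'] := by decide
      have es : ("/" : String).toList = ['/'] := by decide
      have et : ("~" : String).toList = ['~'] := by decide
      rw [e1, e0, es, et, replace_R1, replace_R0, R0_R1]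
    have hstr : PySem.Str.replace (PySem.Str.replace p "~1" "/") "~0" "~"
        = String.ofList (pvU p.toList) := by
      rw [← hseg, String.ofList_toList]
    have hlen : PySem.Str.len (PySem.Str.replace (PySem.Str.replace p "~1" "/") "~0" "~")
        = ((pvU p.toList).length : Int) := by
      rw [PySem.Str.len_eq, hseg]
    have happ : (let seg := PySem.Str.replace (PySem.Str.replace p "~1" "/") "~0" "~"
        ; if PySem.Str.len seg ≠ 0 then init ++ [seg] else init)
        = (if pvU p.toList = [] then init else init ++ [String.ofList (pvU p.toList)]) := by
      show (if PySem.Str.len (PySem.Str.replace (PySem.Str.replace p "~1" "/") "~0" "~") ≠ 0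
          then init ++ [PySem.Str.replace (PySem.Str.replace p "~1" "/") "~0" "~"] else init) = _
      rw [hlen, hstr]
      by_cases h : pvU p.toList = []
      · simp [h]
      · have hl : (pvU p.toList).length ≠ 0 := by
          simpa [List.length_eq_zero_iff] using h
        have hc : ((pvU p.toList).length : Int) ≠ 0 := by exact_mod_cast hl
        simp [h]
    simp only [List.foldl_cons, List.map_cons]
    rw [happ, ih]
    conv_rhs => rw [pvPush_cons]

-- split? on the nonempty literal separator "/"
lemma split_slash (t : String) :
    ∃ ps, PySem.Str.split? t "/" = some ps ∧ ps.map String.toList = pvSplit t.toList := by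
  have h := PySem.Str.split?_map t "/"
  have hsep : ("/" : String).toList = ['/'] := by decide
  rw [hsep] at h
  simp only [PySem.Chars.split?, List.isEmpty_cons, if_neg Bool.false_ne_true] at h
  cases hps : PySem.Str.split? t "/" with
  | none => rw [hps] at h; simp at h
  | some ps =>
    rw [hps] at h
    simp only [Option.map_some, Option.some.injEq] at h
    exact ⟨ps, rfl, by rw [h, splitOn_split]⟩

-- ===== VERDICT (by name: the statement is the Claim_ definition above) =====
theorem pointer_to_segments_py_spec : Claim_equal_pointer_to_segments_py := by
  intro pointer _
  unfold Spec_pointer_to_segments_py pointer_to_segments_py pointer_to_segments_py_alt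
  cases hL : pointer.toList with
  | nil =>
    rw [PySem.Str.len_eq, hL]
    simp
  | cons c rest =>
    have hlen : ¬ PySem.Str.len pointer = 0 := by
      rw [PySem.Str.len_eq, hL]; simp; omega
    rw [if_neg hlen]
    by_cases hc : c = '/'
    · subst hc
      have hsw : PySem.Str.startswith pointer "/" = true := by
        rw [PySem.Str.startswith_eq, hL]
        simp [PySem.Chars.startswith, List.isPrefixOf]
      simp only [hsw, if_true]
      have htr : (PySem.Str.slice pointer (some 1) none).toList = rest := by
        rw [PySem.Str.toList_slice, hL, PySem.Chars.slice_eq_listSlice,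
          PySem.List.slice_from _ (by norm_num)]
        simp
      cases hr : rest with
      | nil =>
        have hlen2 : PySem.Str.len (PySem.Str.slice pointer (some 1) none) = 0 := by
          rw [PySem.Str.len_eq, htr, hr]; simp
        rw [if_pos hlen2]
        simp [pvScan]
      | cons d rest' =>
        have hlen2 : ¬ PySem.Str.len (PySem.Str.slice pointer (some 1) none) = 0 := by
          rw [PySem.Str.len_eq, htr, hr]; simp; omega
        rw [if_neg hlen2]
        obtain ⟨ps, hps, hmap⟩ := split_slash (PySem.Str.slice pointer (some 1) none)
        rw [hps]
        simp only [Option.getD_some]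
        rw [fold_eq_push, hmap, htr, hr]
        rw [scan_spec]
        rcases hsp : pvSplit (d :: rest') with _ | ⟨hh, tt⟩
        · exact absurd hsp (pvSplit_ne_nil _)
        · simp
    · have hsw : PySem.Str.startswith pointer "/" = false := by
        rw [PySem.Str.startswith_eq, hL]
        simp [PySem.Chars.startswith, List.isPrefixOf]
        exact fun h => hc h.symm
      simp only [hsw, Bool.false_eq_true, if_false]
      rw [if_neg hlen]
      obtain ⟨ps, hps, hmap⟩ := split_slash pointer
      rw [hps]
      simp only [Option.getD_some]
      rw [fold_eq_push, hmap, hL]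
      rw [scan_spec]
      simp only [hc, if_false]
      rcases hsp : pvSplit (c :: rest) with _ | ⟨hh, tt⟩
      · exact absurd hsp (pvSplit_ne_nil _)
      · simp
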